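-- pv_equiv track=rewrite | github.com/liskos/jakov | ege05/296.py | f
-- ===== SOURCE A (Python) =====
-- def f(n):
--     n = str(n)
--     s1 = n[::2]
--     s1 = [(int(i)*2)%10 +(int(i)*2)//10 for i in s1]
--     s1 = sum(s1)
--     s2 = n[1::2]
--     s2 = sum(map(int,s2))
--     return (s1 + s2) % 10 == 0
-- ===== SOURCE B (Python) =====
-- def f(n):
--     total = 0
--     even = True
--     for c in str(n):
--         d = int(c)
--         total += d * 2 % 10 + d * 2 // 10 if even else d
--         even = not even
--     return total % 10 == 0
-- ===== Notes on version B (the rewrite author's own statement) =====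
-- stated objective: simpler
-- what changed: B replaces A's two slice-based passes (even-index list comprehension plus odd-index map/sum over str(n)) with a single left-to-right scan over str(n) carrying one running total and a parity flag.
import Mathlib
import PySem

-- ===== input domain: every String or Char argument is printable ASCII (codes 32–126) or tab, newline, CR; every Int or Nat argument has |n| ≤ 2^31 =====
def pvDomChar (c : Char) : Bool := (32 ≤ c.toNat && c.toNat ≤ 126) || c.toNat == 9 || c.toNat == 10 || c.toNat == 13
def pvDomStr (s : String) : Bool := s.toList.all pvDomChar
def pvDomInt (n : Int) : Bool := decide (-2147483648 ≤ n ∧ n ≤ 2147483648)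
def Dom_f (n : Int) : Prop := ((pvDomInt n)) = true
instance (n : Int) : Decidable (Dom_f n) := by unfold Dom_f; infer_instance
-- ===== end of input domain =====

-- B replaces A's two slice-based passes with one left-to-right scan carrying a running total and a parity flag (objective: simpler, single pass).

-- ===== PORT A =====
-- int(c) for a one-character string, as A applies it to each sliced character
def pvDigitVal (c : Char) : Int := (PySem.Int.ofChars? [c]).getD 0

def f (n : Int) : Bool :=
  let s := PySem.Int.toChars n
  let s1 := (PySem.List.slice? s none none 2).getD []
  let s1v := (s1.map (fun c => PySem.Int.mod (pvDigitVal c * 2) 10 + PySem.Int.floordiv (pvDigitVal c * 2) 10)).sum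
  let s2 := (PySem.List.slice? s (some 1) none 2).getD []
  let s2v := (s2.map (fun c => pvDigitVal c)).sum
  PySem.Int.mod (s1v + s2v) 10 == 0

-- ===== PORT B =====
def f_alt (n : Int) : Bool :=
  let r := (PySem.Int.toChars n).foldl
    (fun (st : Int × Bool) c =>
      let d := pvDigitVal c
      (st.1 + (if st.2 then PySem.Int.mod (d * 2) 10 + PySem.Int.floordiv (d * 2) 10 else d), !st.2))
    (0, true)
  PySem.Int.mod r.1 10 == 0

-- ===== PRECONDITION & SPEC =====
-- Pre_f excludes negative arguments: there str(n) begins with a minus sign and int('-') raises ValueError in A (and likewise in B).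
def Pre_f (n : Int) : Prop := 0 ≤ n
instance (n : Int) : Decidable (Pre_f n) := by unfold Pre_f; infer_instance
def pvWitness_f : Int := 18

def Spec_f (n : Int) (out : Bool) : Prop := out = f_alt n
instance (n : Int) (out : Bool) : Decidable (Spec_f n out) := by unfold Spec_f; infer_instance

-- ===== CLAIM (what is proved, stated in full; the proofs are below) =====
def Claim_equal_f : Prop := ∀ (n : Int), Dom_f n → Pre_f n → Spec_f n (f n)

-- ===== LEMMAS AND PROOFS =====

-- elements of a list at even / odd positions
def pvEvens {α : Type} : List α → List α
  | [] => []
  | [a] => [a]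
  | a :: _ :: t => a :: pvEvens t

def pvOdds {α : Type} : List α → List α
  | [] => []
  | _ :: t => pvEvens t

theorem pvEvens_cons {α : Type} (c : α) (cs : List α) :
    pvEvens (c :: cs) = c :: pvOdds cs := by
  cases cs <;> rfl

-- xs[::2] picks out the even positions
theorem pvFilterMap_even {α : Type} (xs : List α) :
    List.filterMap (fun k => xs[2 * k]?) (List.range ((xs.length + 1) / 2)) = pvEvens xs := by
  induction xs using pvEvens.induct with
  | case1 => simp [pvEvens]
  | case2 a => simp [List.range_one, pvEvens]
  | case3 a b t ih =>
    have hlen : (a :: b :: t).length = t.length + 2 := by simp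
    have hcnt : ((a :: b :: t).length + 1) / 2 = (t.length + 1) / 2 + 1 := by
      rw [hlen]; omega
    rw [hcnt, List.range_succ_eq_map, List.filterMap_cons, List.filterMap_map]
    have h0 : (a :: b :: t)[2 * 0]? = some a := rfl
    rw [h0]
    have hstep : (fun k => (a :: b :: t)[2 * (k + 1)]?) = (fun k => t[2 * k]?) := by
      funext k
      have : 2 * (k + 1) = 2 * k + 1 + 1 := by omega
      rw [this]
      simp
    simp only [Function.comp_def]
    rw [show (fun k => (a :: b :: t)[2 * Nat.succ k]?) = (fun k => t[2 * k]?) from hstep]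
    rw [ih, pvEvens]

theorem pvSlice_even {α : Type} (xs : List α) :
    PySem.List.slice? xs none none 2 = some (pvEvens xs) := by
  rw [PySem.List.slice?, PySem.List.sliceIndices]
  simp only [if_neg (by norm_num : ¬ (2:Int) = 0), if_neg (by norm_num : ¬ (2:Int) < 0)]
  by_cases h : xs.length = 0
  · cases xs with
    | nil => simp [pvEvens]
    | cons a t => simp at h
  · have hpos : (0:Int) < xs.length := by omega
    simp only [if_pos (by norm_num : (0:Int) < 2), if_pos hpos]
    have hcnt : (((xs.length : Int) - 0 + 2 - 1) / 2).toNat = (xs.length + 1) / 2 := by omega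
    rw [hcnt]
    have hfun : (fun k : Nat => xs[((0:Int) + 2 * (k:Int)).toNat]?) = (fun k : Nat => xs[2 * k]?) := by
      funext k
      congr 1
      omega
    rw [hfun, pvFilterMap_even]

theorem pvSlice_odd {α : Type} (xs : List α) :
    PySem.List.slice? xs (some 1) none 2 = some (pvOdds xs) := by
  cases xs with
  | nil => rfl
  | cons a t =>
    rw [PySem.List.slice?, PySem.List.sliceIndices]
    simp only [if_neg (by norm_num : ¬ (2:Int) = 0), if_neg (by norm_num : ¬ (2:Int) < 0)]
    have hlen : ((a :: t).length : Int) = (t.length : Int) + 1 := by simp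
    have hclamp : (if (1:Int) < 0 then max (1 + ((a :: t).length:Int)) 0 else min 1 ((a :: t).length:Int)) = 1 := by
      rw [hlen]; simp
    simp only [hclamp]
    by_cases h : t.length = 0
    · cases t with
      | nil => simp [pvOdds, pvEvens]
      | cons b t' => simp at h
    · have hlt : (1:Int) < (a :: t).length := by rw [hlen]; omega
      simp only [if_pos (by norm_num : (0:Int) < 2), if_pos hlt]
      have hcnt : ((((a :: t).length : Int) - 1 + 2 - 1) / 2).toNat = (t.length + 1) / 2 := by
        rw [hlen]; omega
      rw [hcnt]
      have hfun : (fun k : Nat => (a :: t)[((1:Int) + 2 * (k:Int)).toNat]?) = (fun k : Nat => t[2 * k]?) := by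
        funext k
        have : ((1:Int) + 2 * (k:Int)).toNat = 2 * k + 1 := by omega
        rw [this]
        simp
      rw [hfun, pvFilterMap_even, pvOdds]

-- A's two contributions, as functions of a single character
def pvG (c : Char) : Int :=
  PySem.Int.mod (pvDigitVal c * 2) 10 + PySem.Int.floordiv (pvDigitVal c * 2) 10
def pvH (c : Char) : Int := pvDigitVal c

-- B's loop invariant: the flag says which of A's two sums the remaining characters feed
theorem pvLoop_eq (cs : List Char) : ∀ (t : Int) (b : Bool),
    (cs.foldl
      (fun (st : Int × Bool) c =>
        let d := pvDigitVal c
        (st.1 + (if st.2 then PySem.Int.mod (d * 2) 10 + PySem.Int.floordiv (d * 2) 10 else d), !st.2))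
      (t, b)).1 =
    t + (if b then ((pvEvens cs).map pvG).sum + ((pvOdds cs).map pvH).sum
         else ((pvEvens cs).map pvH).sum + ((pvOdds cs).map pvG).sum) := by
  induction cs with
  | nil => intro t b; cases b <;> simp [pvEvens, pvOdds]
  | cons c cs ih =>
    intro t b
    rw [List.foldl_cons]
    rw [ih]
    rw [pvEvens_cons]
    cases cs with
    | nil => cases b <;> simp [pvOdds, pvEvens, pvG, pvH]
    | cons d cs' =>
      have ho : pvOdds (c :: d :: cs') = pvEvens (d :: cs') := rfl
      rw [ho]
      cases b <;> simp [pvG, pvH] <;> ring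

-- ===== VERDICT (by name: the statement is the Claim_ definition above) =====
theorem f_spec : Claim_equal_f := by
  intro n _ _
  unfold Spec_f f f_alt
  simp only [pvSlice_even, pvSlice_odd, Option.getD_some, pvLoop_eq, if_true, zero_add]
  rfl
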